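-- pv_equiv track=rewrite | github.com/Bafomet666/OSINT-SAN | .venv/lib/python3.11/site-packages/stem/response/__init__.py | _get_quote_indices
-- ===== SOURCE A (Python) =====
-- def _get_quote_indices(line, escaped):
--   """
--   Provides the indices of the next two quotes in the given content.
--
--   :param str line: content to be parsed
--   :param bool escaped: unescapes the string
--
--   :returns: **tuple** of two ints, indices being -1 if a quote doesn't exist
--   """
--
--   indices, quote_index = [], -1
--
--   for _ in range(2):
--     quote_index = line.find('"', quote_index + 1)
--
--     # if we have escapes then we need to skip any r'\"' entries
--     if escaped:
--       # skip check if index is -1 (no match) or 0 (first character)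
--       while quote_index >= 1 and line[quote_index - 1] == '\\':
--         quote_index = line.find('"', quote_index + 1)
--
--     indices.append(quote_index)
--
--   return tuple(indices)
-- ===== SOURCE B (Python) =====
-- def _get_quote_indices(line, escaped):
--   quotes = [i for i, c in enumerate(line)
--             if c == '"' and (not escaped or i == 0 or line[i - 1] != '\\')]
--   first = quotes[0] if quotes else -1
--   second = quotes[1] if len(quotes) > 1 else -1
--   return (first, second)
-- ===== Notes on version B (the rewrite author's own statement) =====
-- stated objective: simpler
-- what changed: Replaces A's stateful find/skip machinery (two targeted line.find calls plus an escape-skip while-loop mutating quote_index) with one comprehension collecting every unescaped-quote index and padding the first two with -1.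
import Mathlib
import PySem

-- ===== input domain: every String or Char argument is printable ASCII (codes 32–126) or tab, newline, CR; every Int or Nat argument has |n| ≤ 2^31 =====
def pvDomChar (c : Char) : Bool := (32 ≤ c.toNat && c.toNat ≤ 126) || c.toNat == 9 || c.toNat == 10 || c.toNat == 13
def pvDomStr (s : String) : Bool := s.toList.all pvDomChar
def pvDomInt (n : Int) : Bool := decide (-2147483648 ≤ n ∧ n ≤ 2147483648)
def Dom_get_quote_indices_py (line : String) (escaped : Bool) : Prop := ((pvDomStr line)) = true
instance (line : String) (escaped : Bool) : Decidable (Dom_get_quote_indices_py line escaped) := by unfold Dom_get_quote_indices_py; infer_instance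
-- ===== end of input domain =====

-- B replaces A's two stateful find calls plus the escape-skip while-loop by one pass that
-- collects every unescaped-quote index and pads the first two with -1 (objective: simpler).


-- ===== PORT A =====
-- bound on findFrom, cited by pvSkipLoop's decreasing_by


theorem pvFindFrom_bound (L sub : List Char) (st : Int) (h : 0 ≤ st) :
    PySem.Chars.findFrom L sub st none = -1 ∨
      (st ≤ PySem.Chars.findFrom L sub st none ∧ PySem.Chars.findFrom L sub st none ≤ L.length) := by
  simp only [PySem.Chars.findFrom]
  rw [if_neg (not_lt.mpr h)]
  split
  · exact Or.inl rfl
  · split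
    · exact Or.inl rfl
    · rename_i he hr
      have h1 := PySem.Chars.neg_one_le_find (List.drop st.toNat (List.take ((L.length:Int)).toNat L)) sub
      have h2 := PySem.Chars.find_le_length (List.drop st.toNat (List.take ((L.length:Int)).toNat L)) sub
      have h3 : ((List.drop st.toNat (List.take ((L.length:Int)).toNat L)).length : Int) = L.length - st.toNat := by
        simp [List.length_drop]
        omega
      exact Or.inr ⟨by omega, by omega⟩


-- A's 'while quote_index >= 1 and line[quote_index - 1] == '\\'' loop
def pvSkipLoop (L : List Char) (q : Int) : Int :=
  if h : 1 ≤ q ∧ PySem.List.pyGet? L (q - 1) = some '\\' then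
    pvSkipLoop L (PySem.Chars.findFrom L ['"'] (q + 1) none)
  else q
termination_by (if q < 0 then 0 else L.length + 1 - q.toNat)
decreasing_by
  have hin : PySem.Raise.InRange L.length (q - 1) := by
    by_contra hc
    rw [(PySem.List.pyGet?_eq_none_iff (xs := L) (i := q - 1)).mpr hc] at h
    simp at h
  obtain ⟨hq, _⟩ := h
  unfold PySem.Raise.InRange at hin
  have hb := pvFindFrom_bound L ['"'] (q + 1) (by omega)
  have hq0 : ¬ q < 0 := by omega
  rcases hb with hb | hb
  · rw [hb]
    simp only [if_neg hq0, show ((-1 : Int) < 0) = True by simp, if_true]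
    omega
  · have hq0' : ¬ PySem.Chars.findFrom L ['"'] (q + 1) none < 0 := by omega
    simp only [if_neg hq0, if_neg hq0']
    omega


-- one iteration of A's 'for _ in range(2)' body: line.find('"', start), then the escape-skip loop
def pvFindSkip (L : List Char) (escaped : Bool) (start : Int) : Int :=
  let q := PySem.Chars.findFrom L ['"'] start none
  if escaped then pvSkipLoop L q else q


-- A's loop of two iterations, unrolled (quote_index starts at -1)
def get_quote_indices_py (line : String) (escaped : Bool) : Int × Int :=
  let L := line.toList
  let q1 := pvFindSkip L escaped ((-1 : Int) + 1)
  let q2 := pvFindSkip L escaped (q1 + 1)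
  (q1, q2)


-- ===== PORT B =====
def get_quote_indices_py_alt (line : String) (escaped : Bool) : Int × Int :=
  let L := line.toList
  let quotes := ((PySem.List.enumerate L 0).filter
      (fun p => p.2 == '"' && (!escaped || p.1 == 0 || !(PySem.List.pyGetD L (p.1 - 1) ' ' == '\\')))).map (·.1)
  (quotes.getD 0 (-1), quotes.getD 1 (-1))


-- ===== PRECONDITION & SPEC =====
def Spec_get_quote_indices_py (line : String) (escaped : Bool) (out : Int × Int) : Prop := out = get_quote_indices_py_alt line escaped
instance (line : String) (escaped : Bool) (out : Int × Int) : Decidable (Spec_get_quote_indices_py line escaped out) := by unfold Spec_get_quote_indices_py; infer_instance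

-- ===== CLAIM (what is proved, stated in full; the proofs are below) =====
def Claim_equal_get_quote_indices_py : Prop := ∀ (line : String) (escaped : Bool), Dom_get_quote_indices_py line escaped → Spec_get_quote_indices_py line escaped (get_quote_indices_py line escaped)

-- ===== LEMMAS AND PROOFS =====


def okQ (L : List Char) (esc : Bool) (i : Nat) : Bool :=
  (L[i]? == some '"') && (!esc || i == 0 || !(L[i-1]? == some '\\'))

def firstQ (L : List Char) (esc : Bool) (k : Nat) : Option Nat :=
  if h : k < L.length then (if okQ L esc k then some k else firstQ L esc (k+1)) else none
termination_by L.length - k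

theorem okQ_lt (L : List Char) (esc : Bool) (i : Nat) (h : okQ L esc i = true) : i < L.length := by
  unfold okQ at h
  by_contra hc
  simp [List.getElem?_eq_none (by omega : L.length ≤ i)] at h

theorem firstQ_none (L : List Char) (esc : Bool) (k : Nat)
    (h : ∀ j, k ≤ j → okQ L esc j = false) : firstQ L esc k = none := by
  unfold firstQ
  split
  · rw [if_neg (by simp [h k le_rfl])]
    exact firstQ_none L esc (k+1) (fun j hj => h j (by omega))
  · rfl
termination_by L.length - k

theorem firstQ_some (L : List Char) (esc : Bool) (k q : Nat) (hkq : k ≤ q)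
    (hok : okQ L esc q = true) (hmin : ∀ j, k ≤ j → j < q → okQ L esc j = false) :
    firstQ L esc k = some q := by
  have hql := okQ_lt L esc q hok
  unfold firstQ
  rcases Nat.eq_or_lt_of_le hkq with he | hlt
  · subst he
    rw [dif_pos hql, if_pos hok]
  · rw [dif_pos (by omega), if_neg (by simp [hmin k le_rfl hlt])]
    exact firstQ_some L esc (k+1) q (by omega) hok (fun j hj hj2 => hmin j (by omega) hj2)
termination_by L.length - k

theorem firstQ_spec (L : List Char) (esc : Bool) (k i : Nat) (h : firstQ L esc k = some i) :
    k ≤ i ∧ i < L.length ∧ okQ L esc i = true ∧ ∀ j, k ≤ j → j < i → okQ L esc j = false := by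
  unfold firstQ at h
  split at h
  · rename_i hk
    split at h
    · rename_i hok
      cases h
      exact ⟨le_rfl, hk, hok, fun j h1 h2 => by omega⟩
    · rename_i hok
      obtain ⟨a, b, c, d⟩ := firstQ_spec L esc (k+1) i h
      refine ⟨by omega, b, c, fun j h1 h2 => ?_⟩
      rcases Nat.eq_or_lt_of_le h1 with he | hlt
      · subst he; simpa using hok
      · exact d j (by omega) h2
  · cases h
termination_by L.length - k

theorem prefix_drop_iff (L : List Char) (c : Char) (j : Nat) :
    ([c] <+: L.drop j) ↔ L[j]? = some c := by
  constructor
  · rintro ⟨t, ht⟩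
    have : (L.drop j)[0]? = some c := by rw [← ht]; rfl
    rwa [List.getElem?_drop, Nat.add_zero] at this
  · intro h
    have hj : j < L.length := by
      by_contra hc
      simp [List.getElem?_eq_none (by omega : L.length ≤ j)] at h
    have : L.drop j = c :: L.drop (j+1) := by
      rw [List.drop_eq_getElem_cons hj]
      have he : L[j] = c := by
        simp [List.getElem?_eq_some_iff] at h
        exact h.2
      rw [he]
    rw [this]
    exact ⟨L.drop (j+1), rfl⟩

theorem firstQ_congr (L : List Char) (esc : Bool) (k m : Nat) (hkm : k ≤ m) (hm : m ≤ L.length)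
    (h : ∀ j, k ≤ j → j < m → okQ L esc j = false) : firstQ L esc k = firstQ L esc m := by
  rcases Nat.eq_or_lt_of_le hkm with he | hlt
  · rw [he]
  · rw [firstQ]
    rw [dif_pos (by omega), if_neg (by simp [h k le_rfl hlt])]
    exact firstQ_congr L esc (k+1) m (by omega) hm (fun j h1 h2 => h j (by omega) h2)
termination_by m - k

-- characterize findFrom for the single-character pattern '"'

theorem findQ_char (L : List Char) (k : Nat) (hk : k ≤ L.length) :
    (PySem.Chars.findFrom L ['"'] (k : Int) none = -1 ∧ ∀ j, k ≤ j → L[j]? ≠ some '"')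
    ∨ (∃ m : Nat, PySem.Chars.findFrom L ['"'] (k : Int) none = (m : Int) ∧ k ≤ m ∧
        L[m]? = some '"' ∧ ∀ j, k ≤ j → j < m → L[j]? ≠ some '"') := by
  rw [PySem.Chars.findFrom_natCast L ['"'] k hk]
  by_cases hf : PySem.Chars.find (List.drop k L) ['"'] = -1
  · left
    refine ⟨by simp [hf], fun j hj hc => ?_⟩
    rw [PySem.Chars.find_eq_neg_one_iff] at hf
    apply hf
    have hps : ['"'] <+: List.drop (j - k) (List.drop k L) := by
      rw [List.drop_drop, (by omega : k + (j - k) = j)]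
      exact (prefix_drop_iff L '"' j).mpr hc
    exact hps.isInfix.trans (List.drop_suffix (j - k) (List.drop k L)).isInfix
  · right
    have hnn : 0 ≤ PySem.Chars.find (List.drop k L) ['"'] := by
      have := PySem.Chars.neg_one_le_find (List.drop k L) ['"']
      omega
    obtain ⟨hpre, hmin⟩ := PySem.Chars.find_spec hnn
    set f := PySem.Chars.find (List.drop k L) ['"'] with hfd
    refine ⟨k + f.toNat, by simp [hf]; omega, by omega, ?_, ?_⟩
    · rw [← prefix_drop_iff]
      rwa [List.drop_drop] at hpre
    · intro j h1 h2 hc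
      have := hmin (j - k) (by omega)
      apply this
      rw [List.drop_drop, (by omega : k + (j - k) = j)]
      exact (prefix_drop_iff L '"' j).mpr hc

theorem findSkip_eq (L : List Char) (esc : Bool) (k : Nat) (hk : k ≤ L.length) :
    pvFindSkip L esc (k : Int) = (firstQ L esc k).elim (-1) (fun i => (i : Int)) := by
  rcases findQ_char L k hk with ⟨hq, hnoq⟩ | ⟨m, hq, hkm, hquote, hmin⟩
  · -- no quote at or after k
    have hfn : firstQ L esc k = none := by
      apply firstQ_none
      intro j hj
      unfold okQ
      simp [hnoq j hj]
    rw [hfn]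
    simp only [pvFindSkip, hq, Option.elim]
    cases esc
    · rfl
    · rw [if_pos rfl, pvSkipLoop]
      simp
  · -- first quote at m
    have hml : m < L.length := by
      by_contra hc
      rw [List.getElem?_eq_none (by omega : L.length ≤ m)] at hquote
      cases hquote
    have hnoq : ∀ j, k ≤ j → j < m → okQ L esc j = false := by
      intro j h1 h2
      unfold okQ
      simp [hmin j h1 h2]
    simp only [pvFindSkip, hq]
    cases esc
    · -- not escaped: okQ is just 'is a quote'
      rw [if_neg (by decide)]
      rw [firstQ_some L false k m hkm (by simp [okQ, hquote]) hnoq]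
      rfl
    · rw [if_pos rfl]
      by_cases hok : okQ L true m = true
      · rw [firstQ_some L true k m hkm hok hnoq]
        have hcond : ¬ (1 ≤ (m : Int) ∧ PySem.List.pyGet? L ((m : Int) - 1) = some '\\') := by
          rintro ⟨h1, h2⟩
          unfold okQ at hok
          simp only [hquote, beq_self_eq_true, Bool.true_and] at hok
          have hm1 : m ≠ 0 := by omega
          rw [(by omega : (m : Int) - 1 = ((m - 1 : Nat) : Int)), PySem.List.pyGet?_natCast] at h2
          simp [hm1, h2] at hok
        rw [pvSkipLoop, dif_neg hcond]
        rfl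
      · -- m is an escaped quote: skip it
        have hm1 : m ≠ 0 ∧ L[m-1]? = some '\\' := by
          unfold okQ at hok
          simp only [hquote, beq_self_eq_true, Bool.true_and] at hok
          simpa using hok
        rw [pvSkipLoop, dif_pos ⟨by omega, by
          rw [(by omega : (m : Int) - 1 = ((m - 1 : Nat) : Int)), PySem.List.pyGet?_natCast]
          exact hm1.2⟩]
        have hrec := findSkip_eq L true (m + 1) (by omega)
        rw [show ((m + 1 : Nat) : Int) = (m : Int) + 1 by push_cast; ring] at hrec
        simp only [pvFindSkip] at hrec
        rw [if_true] at hrec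
        rw [hrec]
        rw [firstQ_congr L true k (m + 1) (by omega) (by omega) ?_]
        intro j h1 h2
        rcases Nat.lt_or_ge j m with hj | hj
        · exact hnoq j h1 hj
        · have : j = m := by omega
          subst this
          simpa using hok
termination_by L.length + 1 - k

theorem P_eq_okQ (L : List Char) (esc : Bool) (k : Nat) (hk : k < L.length) :
    ((L[k] == '"') && (!esc || ((k : Int) == 0) || !(PySem.List.pyGetD L ((k : Int) - 1) ' ' == '\\')))
      = okQ L esc k := by
  unfold okQ
  have h1 : (L[k]? == some '"') = (L[k] == '"') := by simp [List.getElem?_eq_getElem hk]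
  rw [h1]
  by_cases h0 : k = 0
  · subst h0; simp
  · have e1 : ((k : Int) == 0) = false := by simp; omega
    have e2 : (k == 0) = false := by simp [h0]
    have e3 : PySem.List.pyGetD L ((k : Int) - 1) ' ' = L[k-1]'(by omega) := by
      rw [(by omega : (k : Int) - 1 = ((k - 1 : Nat) : Int)), PySem.List.pyGetD_natCast]
      simp [List.getD_eq_getElem?_getD, List.getElem?_eq_getElem (by omega : k - 1 < L.length)]
    have e4 : (L[k-1]? == some '\\') = (L[k-1]'(by omega) == '\\') := by
      simp [List.getElem?_eq_getElem (by omega : k - 1 < L.length)]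
    rw [e1, e2, e3, e4]

theorem filterB_eq (L : List Char) (esc : Bool) (k : Nat) (hk : k ≤ L.length) :
    ((PySem.List.enumerate (L.drop k) ((k : Nat) : Int)).filter
        (fun p => p.2 == '"' && (!esc || p.1 == 0 || !(PySem.List.pyGetD L (p.1 - 1) ' ' == '\\')))).map (·.1)
      = (match firstQ L esc k with
         | none => []
         | some i => (i : Int) ::
            ((PySem.List.enumerate (L.drop (i+1)) (((i+1 : Nat)) : Int)).filter
              (fun p => p.2 == '"' && (!esc || p.1 == 0 || !(PySem.List.pyGetD L (p.1 - 1) ' ' == '\\')))).map (·.1)) := by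
  by_cases h : k < L.length
  · rw [List.drop_eq_getElem_cons h, PySem.List.enumerate_cons]
    rw [List.filter_cons]
    simp only [P_eq_okQ L esc k h]
    by_cases hok : okQ L esc k = true
    · rw [if_pos hok]
      rw [firstQ, dif_pos h, if_pos hok]
      simp only [List.map_cons]
      rw [show ((k : Int) + 1) = ((k + 1 : Nat) : Int) by push_cast; ring]
    · rw [if_neg (by simp_all)]
      rw [firstQ, dif_pos h, if_neg (by simp_all)]
      rw [show ((k : Int) + 1) = ((k + 1 : Nat) : Int) by push_cast; ring]
      exact filterB_eq L esc (k+1) (by omega)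
  · have hd : List.drop k L = [] := List.drop_eq_nil_of_le (by omega)
    rw [firstQ, dif_neg h, hd, PySem.List.enumerate_nil]
    rfl
termination_by L.length - k

theorem main_eq (line : String) (escaped : Bool) :
    get_quote_indices_py line escaped = get_quote_indices_py_alt line escaped := by
  simp only [get_quote_indices_py, get_quote_indices_py_alt]
  set L := line.toList with hL
  have hz : ((-1 : Int) + 1) = ((0 : Nat) : Int) := by norm_num
  have henum : PySem.List.enumerate L (0 : Int) = PySem.List.enumerate (L.drop 0) (((0:Nat)) : Int) := by
    simp
  rw [hz, henum, findSkip_eq L escaped 0 (by omega), filterB_eq L escaped 0 (by omega)]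
  cases hfq : firstQ L escaped 0 with
  | none =>
    simp only [Option.elim]
    rw [show ((-1 : Int) + 1) = ((0 : Nat) : Int) by norm_num, findSkip_eq L escaped 0 (by omega), hfq]
    rfl
  | some i =>
    obtain ⟨-, hil, -, -⟩ := firstQ_spec L escaped 0 i hfq
    simp only [Option.elim]
    rw [show ((i : Int) + 1) = ((i + 1 : Nat) : Int) by push_cast; ring,
        findSkip_eq L escaped (i+1) (by omega), filterB_eq L escaped (i+1) (by omega)]
    cases hfq2 : firstQ L escaped (i+1) with
    | none => rfl
    | some j => rfl


-- ===== VERDICT (by name: the statement is the Claim_ definition above) =====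
theorem get_quote_indices_py_spec : Claim_equal_get_quote_indices_py := by
  intro line escaped _
  unfold Spec_get_quote_indices_py
  exact main_eq line escaped
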